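-- pv_equiv track=rewrite | github.com/titanium9288/training | 백준/Silver/1244. 스위치 켜고 끄기/스위치 켜고 끄기.py | girl
-- ===== SOURCE A (Python) =====
-- def girl(n, switches):
--     n = n - 1
--     for i in range(0, len(switches)):
--         if n - i < 0 or n + i >= len(switches):
--             break
--
--         if switches[n - i] == switches[n + i]:
--             if i != 0:
--                 switches[n - i] = 1 - switches[n - i]
--             switches[n + i] = 1 - switches[n + i]
--         else:
--             break
--
--     return switches
-- ===== SOURCE B (Python) =====
-- def girl(n, switches):
--     # Different decomposition: no index expansion around the center. Slice the
--     # neighbourhoods out, find the first mismatch in the zipped pair stream to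
--     # get the flip radius, then rebuild the whole list with one comprehension
--     # (written back in place via slice assignment, as A mutates its argument).
--     c = n - 1
--     if c < 0 or c >= len(switches):
--         return switches
--     left = switches[:c][::-1]          # elements left of the center, nearest first
--     right = switches[c + 1:]           # elements right of the center, nearest first
--     r = next((i for i, (a, b) in enumerate(zip(left, right)) if a != b),
--              min(len(left), len(right)))
--     switches[:] = [1 - v if abs(k - c) <= r else v for k, v in enumerate(switches)]
--     return switches
-- ===== Notes on version B (the rewrite author's own statement) =====
-- stated objective: alternative
-- what changed: A expands outward from the center flipping pairs in place with index arithmetic until a break; B slices out the two neighbourhoods, finds the radius as the first mismatch of their zip, and rebuilds the whole list with one enumerate comprehension flipping every position within that radius.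
import Mathlib
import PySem

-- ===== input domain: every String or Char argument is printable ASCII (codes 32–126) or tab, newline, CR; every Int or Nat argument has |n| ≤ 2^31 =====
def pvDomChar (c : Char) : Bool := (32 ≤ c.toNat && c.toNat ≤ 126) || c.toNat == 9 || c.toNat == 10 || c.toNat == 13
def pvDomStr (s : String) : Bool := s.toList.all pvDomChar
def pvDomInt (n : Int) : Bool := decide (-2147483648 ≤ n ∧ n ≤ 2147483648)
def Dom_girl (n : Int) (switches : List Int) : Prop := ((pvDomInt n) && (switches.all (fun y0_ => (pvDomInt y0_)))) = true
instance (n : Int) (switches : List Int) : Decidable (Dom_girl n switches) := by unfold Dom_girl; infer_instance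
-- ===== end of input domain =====

-- B finds the flip radius as the first mismatch of the zipped left/right slices and rebuilds
-- the list with one enumerate comprehension; both Pythons mutate `switches` in place and
-- return it — the theorems are about the return value.

-- ===== PORT A =====
-- `switches[k] = 1 - switches[k]`; every use is guarded in range, where pyGetD/pySetD are exact.
def flipAt (sw : List Int) (k : Int) : List Int :=
  PySem.List.pySetD sw k (1 - PySem.List.pyGetD sw k 0)

-- A's for-loop with break, fuel = len(switches) (the range bound); i is the loop counter.
def girlGo (fuel : Nat) (c : Int) (sw : List Int) (i : Nat) : List Int :=
  match fuel with
  | 0 => sw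
  | f + 1 =>
    if c - (i : Int) < 0 ∨ (sw.length : Int) ≤ c + (i : Int) then sw
    else if PySem.List.pyGetD sw (c - (i : Int)) 0 = PySem.List.pyGetD sw (c + (i : Int)) 0 then
      let sw1 := if i ≠ 0 then flipAt sw (c - (i : Int)) else sw
      let sw2 := flipAt sw1 (c + (i : Int))
      girlGo f c sw2 (i + 1)
    else sw

def girl (n : Int) (switches : List Int) : List Int :=
  girlGo switches.length (n - 1) switches 0

-- ===== PORT B =====
-- hand port of `next((i for i, (a, b) in enumerate(zip(left, right)) if a != b), min(len(left), len(right)))`: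
-- the index of the first mismatched pair, or the length of the zip (= min of the lengths) if none — exact.
def firstMismatch : List (Int × Int) → Nat
  | [] => 0
  | (a, b) :: t => if a = b then firstMismatch t + 1 else 0

def girl_alt (n : Int) (switches : List Int) : List Int :=
  let c := n - 1
  if c < 0 ∨ (switches.length : Int) ≤ c then switches
  else
    -- switches[:c][::-1]  ([::-1] is reversal, PySem.List.slice?_none_none_neg_one)
    let left := (PySem.List.slice switches none (some c)).reverse
    -- switches[c+1:]
    let right := PySem.List.slice switches (some (c + 1)) none
    let r := firstMismatch (left.zip right)
    (PySem.List.enumerate switches).map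
      (fun kv => if |kv.1 - c| ≤ (r : Int) then 1 - kv.2 else kv.2)

-- ===== PRECONDITION & SPEC =====
def Spec_girl (n : Int) (switches : List Int) (out : List Int) : Prop := out = girl_alt n switches
instance (n : Int) (switches : List Int) (out : List Int) : Decidable (Spec_girl n switches out) := by unfold Spec_girl; infer_instance

-- ===== CLAIM (what is proved, stated in full; the proofs are below) =====
def Claim_equal_girl : Prop := ∀ (n : Int) (switches : List Int), Dom_girl n switches → Spec_girl n switches (girl n switches)

-- ===== LEMMAS AND PROOFS =====

theorem length_flipAt (sw : List Int) (k : Int) : (flipAt sw k).length = sw.length := by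
  simp [flipAt, PySem.List.length_pySetD]

-- unfolding equations (girlGo is defined by a match on the fuel)
theorem girlGo_zero (c : Int) (sw : List Int) (i : Nat) : girlGo 0 c sw i = sw := rfl

theorem girlGo_succ (f : Nat) (c : Int) (sw : List Int) (i : Nat) :
    girlGo (f + 1) c sw i =
      (if c - (i : Int) < 0 ∨ (sw.length : Int) ≤ c + (i : Int) then sw
       else if PySem.List.pyGetD sw (c - (i : Int)) 0 = PySem.List.pyGetD sw (c + (i : Int)) 0 then
         girlGo f c (flipAt (if i ≠ 0 then flipAt sw (c - (i : Int)) else sw) (c + (i : Int))) (i + 1)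
       else sw) := rfl

-- proof-side description of A's stopping point: the radius scan from the old two-phase view
def girlRad (fuel : Nat) (c : Int) (sw : List Int) (r : Nat) : Nat :=
  match fuel with
  | 0 => r
  | f + 1 =>
    if 0 ≤ c - ((r : Int) + 1) ∧ c + ((r : Int) + 1) < (sw.length : Int) ∧
        PySem.List.pyGetD sw (c - ((r : Int) + 1)) 0 = PySem.List.pyGetD sw (c + ((r : Int) + 1)) 0 then
      girlRad f c sw (r + 1)
    else r

theorem girlRad_zero (c : Int) (sw : List Int) (r : Nat) : girlRad 0 c sw r = r := rfl

theorem girlRad_succ (f : Nat) (c : Int) (sw : List Int) (r : Nat) :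
    girlRad (f + 1) c sw r =
      (if 0 ≤ c - ((r : Int) + 1) ∧ c + ((r : Int) + 1) < (sw.length : Int) ∧
          PySem.List.pyGetD sw (c - ((r : Int) + 1)) 0 = PySem.List.pyGetD sw (c + ((r : Int) + 1)) 0 then
        girlRad f c sw (r + 1)
      else r) := rfl

-- reading after flipping at an in-range index (only needed at in-range read positions)
theorem pyGetD_flipAt (sw : List Int) (k m : Int) (h0 : 0 ≤ k) (h1 : k < (sw.length : Int))
    (hm0 : 0 ≤ m) (hm1 : m < (sw.length : Int)) :
    PySem.List.pyGetD (flipAt sw k) m 0 =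
      if m = k then 1 - PySem.List.pyGetD sw k 0 else PySem.List.pyGetD sw m 0 := by
  rw [flipAt, PySem.List.pySetD_of_nonneg _ _ h0,
    PySem.List.pyGetD_eq_getElem _ 0 hm0 (by simpa using hm1),
    List.getElem_set,
    PySem.List.pyGetD_eq_getElem sw 0 hm0 hm1,
    PySem.List.pyGetD_eq_getElem sw 0 h0 h1]
  by_cases h : m = k
  · rw [if_pos (by omega), if_pos h]
  · rw [if_neg (by omega), if_neg h]

theorem girlRad_ge (fuel : Nat) (c : Int) (sw : List Int) (r : Nat) : r ≤ girlRad fuel c sw r := by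
  induction fuel generalizing r with
  | zero => simp [girlRad_zero]
  | succ f ih =>
    rw [girlRad_succ]
    split
    · exact le_trans (Nat.le_succ r) (ih (r + 1))
    · exact le_rfl

-- the main simulation lemma: A's remaining loop (from step r+1, on the partially flipped
-- list sw') equals applying a flip pair for each further step the radius scan (on the
-- original list sw) accepts.  sw' agrees with sw at every in-range pair beyond distance r.
theorem girlGo_eq_fold (fuel : Nat) (c : Int) (sw : List Int) :
    ∀ (r : Nat) (sw' : List Int), sw'.length = sw.length →
    (∀ j : Nat, r < j → 0 ≤ c - (j : Int) → c + (j : Int) < (sw.length : Int) →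
        PySem.List.pyGetD sw' (c - (j : Int)) 0 = PySem.List.pyGetD sw (c - (j : Int)) 0 ∧
        PySem.List.pyGetD sw' (c + (j : Int)) 0 = PySem.List.pyGetD sw (c + (j : Int)) 0) →
    girlGo fuel c sw' (r + 1) =
      (PySem.List.pyRange ((r : Int) + 1) ((girlRad fuel c sw r : Int) + 1) 1).foldl
        (fun sw j => flipAt (flipAt sw (c - j)) (c + j)) sw' := by
  induction fuel with
  | zero =>
    intro r sw' _ _
    rw [girlGo_zero, girlRad_zero, PySem.List.pyRange_one]
    simp
  | succ f ih =>
    intro r sw' hlen hagree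
    by_cases hb : 0 ≤ c - ((r : Int) + 1) ∧ c + ((r : Int) + 1) < (sw.length : Int)
    · obtain ⟨hb1, hb2⟩ := hb
      have hget := hagree (r + 1) (by omega) (by push_cast; omega) (by push_cast; omega)
      push_cast at hget
      by_cases heq : PySem.List.pyGetD sw (c - ((r : Int) + 1)) 0 = PySem.List.pyGetD sw (c + ((r : Int) + 1)) 0
      · -- the pair matches: both sides take one step
        have hrad : girlRad (f + 1) c sw r = girlRad f c sw (r + 1) := by
          rw [girlRad_succ, if_pos ⟨hb1, hb2, heq⟩]
        have hstep : girlGo (f + 1) c sw' (r + 1) =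
            girlGo f c (flipAt (flipAt sw' (c - ((r : Int) + 1))) (c + ((r : Int) + 1))) (r + 2) := by
          rw [girlGo_succ,
            if_neg (by rw [hlen]; push_cast; omega),
            if_pos (by push_cast; rw [hget.1, hget.2]; exact heq),
            if_pos (by omega)]
          norm_num
        rw [hstep, hrad]
        -- set the new partially-flipped list
        set sw'' := flipAt (flipAt sw' (c - ((r : Int) + 1))) (c + ((r : Int) + 1)) with hsw''
        have hlen'' : sw''.length = sw.length := by
          simp [hsw'', length_flipAt, hlen]
        have hagree'' : ∀ j : Nat, r + 1 < j → 0 ≤ c - (j : Int) → c + (j : Int) < (sw.length : Int) →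
            PySem.List.pyGetD sw'' (c - (j : Int)) 0 = PySem.List.pyGetD sw (c - (j : Int)) 0 ∧
            PySem.List.pyGetD sw'' (c + (j : Int)) 0 = PySem.List.pyGetD sw (c + (j : Int)) 0 := by
          intro j hj h0 h1
          have hl1 : (flipAt sw' (c - ((r : Int) + 1))).length = sw.length := by
            simp [length_flipAt, hlen]
          have e1 : PySem.List.pyGetD sw'' (c - (j : Int)) 0 =
              PySem.List.pyGetD sw' (c - (j : Int)) 0 := by
            rw [hsw'', pyGetD_flipAt _ _ _ (by omega) (by rw [hl1]; omega) (by omega) (by rw [hl1]; omega),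
              if_neg (by omega),
              pyGetD_flipAt _ _ _ (by omega) (by rw [hlen]; omega) (by omega) (by rw [hlen]; omega),
              if_neg (by omega)]
          have e2 : PySem.List.pyGetD sw'' (c + (j : Int)) 0 =
              PySem.List.pyGetD sw' (c + (j : Int)) 0 := by
            rw [hsw'', pyGetD_flipAt _ _ _ (by omega) (by rw [hl1]; omega) (by omega) (by rw [hl1]; omega),
              if_neg (by omega),
              pyGetD_flipAt _ _ _ (by omega) (by rw [hlen]; omega) (by omega) (by rw [hlen]; omega),
              if_neg (by omega)]
          rw [e1, e2]
          exact hagree j (by omega) h0 h1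
        have hih := ih (r + 1) sw'' hlen'' hagree''
        -- peel the first element of the range on the RHS
        have hge : r + 1 ≤ girlRad f c sw (r + 1) := girlRad_ge f c sw (r + 1)
        have hpeel : PySem.List.pyRange ((r : Int) + 1) ((girlRad f c sw (r + 1) : Int) + 1) =
            ((r : Int) + 1) :: PySem.List.pyRange ((r : Int) + 1 + 1) ((girlRad f c sw (r + 1) : Int) + 1) :=
          PySem.List.pyRange_one_cons (by omega)
        rw [hpeel, List.foldl_cons, show ((r : Nat) + 2) = (r + 1) + 1 by ring, hih, ← hsw'']
        push_cast
        ring_nf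
      · -- unequal pair: A breaks, the radius scan stops
        have hrad : girlRad (f + 1) c sw r = r := by
          rw [girlRad_succ, if_neg (by tauto)]
        have hstop : girlGo (f + 1) c sw' (r + 1) = sw' := by
          rw [girlGo_succ,
            if_neg (by rw [hlen]; push_cast; omega),
            if_neg (by push_cast; rw [hget.1, hget.2]; exact heq)]
        rw [hstop, hrad]
        rw [PySem.List.pyRange_one]
        simp
    · -- out of bounds: A breaks, the radius scan stops
      have hrad : girlRad (f + 1) c sw r = r := by
        rw [girlRad_succ, if_neg (by tauto)]
      have hstop : girlGo (f + 1) c sw' (r + 1) = sw' := by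
        rw [girlGo_succ, if_pos (by rw [hlen]; push_cast; omega)]
      rw [hstop, hrad]
      rw [PySem.List.pyRange_one]
      simp

-- ===== bridge from the radius scan to B's firstMismatch =====

theorem firstMismatch_le_length (z : List (Int × Int)) : firstMismatch z ≤ z.length := by
  induction z with
  | nil => simp [firstMismatch]
  | cons p t ih =>
    obtain ⟨a, b⟩ := p
    simp only [firstMismatch]
    split <;> simp
    omega

theorem girlRad_eq_firstMismatch (c : Int) (sw : List Int)
    (h0 : 0 ≤ c) (h1 : c < (sw.length : Int)) :
    ∀ (fuel k : Nat),
      (((sw.take c.toNat).reverse.zip (sw.drop (c.toNat + 1))).length ≤ k + fuel) →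
      girlRad fuel c sw k =
        k + firstMismatch (((sw.take c.toNat).reverse.zip (sw.drop (c.toNat + 1))).drop k) := by
  intro fuel
  induction fuel with
  | zero =>
    intro k hk
    rw [girlRad_zero, List.drop_eq_nil_of_le (by omega)]
    simp [firstMismatch]
  | succ f ih =>
    intro k hk
    have hcn : ((c.toNat : Int)) = c := Int.toNat_of_nonneg h0
    have hlz : ((sw.take c.toNat).reverse.zip (sw.drop (c.toNat + 1))).length
        = min c.toNat (sw.length - (c.toNat + 1)) := by
      rw [List.length_zip, List.length_reverse, List.length_take, List.length_drop]
      omega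
    by_cases hklt : k < ((sw.take c.toNat).reverse.zip (sw.drop (c.toNat + 1))).length
    · have hk1 : k + 1 ≤ c.toNat := by omega
      have hk2 : c.toNat + 1 + k < sw.length := by omega
      have hzk : ((sw.take c.toNat).reverse.zip (sw.drop (c.toNat + 1)))[k]'hklt
          = (sw[c.toNat - 1 - k]'(by omega), sw[c.toNat + 1 + k]'(by omega)) := by
        rw [List.getElem_zip, List.getElem_reverse, List.getElem_take, List.getElem_drop]
        congr 2
        rw [List.length_take]
        omega
      have hL : PySem.List.pyGetD sw (c - ((k : Int) + 1)) 0 = sw[c.toNat - 1 - k]'(by omega) := by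
        rw [PySem.List.pyGetD_eq_getElem sw 0 (by omega) (by omega)]
        congr 1
        omega
      have hR : PySem.List.pyGetD sw (c + ((k : Int) + 1)) 0 = sw[c.toNat + 1 + k]'(by omega) := by
        rw [PySem.List.pyGetD_eq_getElem sw 0 (by omega) (by omega)]
        congr 1
        omega
      have hdropk : ((sw.take c.toNat).reverse.zip (sw.drop (c.toNat + 1))).drop k
          = ((sw.take c.toNat).reverse.zip (sw.drop (c.toNat + 1)))[k]'hklt ::
            ((sw.take c.toNat).reverse.zip (sw.drop (c.toNat + 1))).drop (k + 1) :=
        List.drop_eq_getElem_cons hklt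
      by_cases heq : (sw[c.toNat - 1 - k]'(by omega) : Int) = sw[c.toNat + 1 + k]'(by omega)
      · rw [girlRad_succ, if_pos ⟨by omega, by omega, by rw [hL, hR]; exact heq⟩,
          ih (k + 1) (by omega), hdropk, hzk]
        simp only [firstMismatch, if_pos heq]
        omega
      · rw [girlRad_succ, if_neg (by rw [hL, hR]; tauto), hdropk, hzk]
        simp only [firstMismatch, if_neg heq]
        omega
    · rw [girlRad_succ, if_neg (by
        intro hS
        obtain ⟨hS1, hS2, _⟩ := hS
        omega),
        List.drop_eq_nil_of_le (by omega)]
      simp [firstMismatch]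

-- ===== the flip fold, element-wise =====

theorem length_foldFlip (c : Int) (l : List Int) (init : List Int) :
    (l.foldl (fun sw j => flipAt (flipAt sw (c - j)) (c + j)) init).length = init.length := by
  induction l generalizing init with
  | nil => rfl
  | cons x t ih => simp [List.foldl_cons, ih, length_flipAt]

theorem foldFlip_getD (sw : List Int) (c : Int) (h0 : 0 ≤ c) (h1 : c < (sw.length : Int)) :
    ∀ (r : Nat), 0 ≤ c - (r : Int) → c + (r : Int) < (sw.length : Int) →
    ∀ (m : Int), 0 ≤ m → m < (sw.length : Int) →
      PySem.List.pyGetD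
        ((PySem.List.pyRange 1 ((r : Int) + 1) 1).foldl
          (fun sw j => flipAt (flipAt sw (c - j)) (c + j)) (flipAt sw c)) m 0 =
      (if c - (r : Int) ≤ m ∧ m ≤ c + (r : Int)
        then 1 - PySem.List.pyGetD sw m 0 else PySem.List.pyGetD sw m 0) := by
  intro r
  induction r with
  | zero =>
    intro _ _ m hm0 hm1
    rw [show (((0 : Nat) : Int)) + 1 = 1 by norm_num,
      PySem.List.pyRange_one_eq_nil (le_refl 1), List.foldl_nil,
      pyGetD_flipAt sw c m h0 h1 hm0 hm1]
    by_cases hmc : m = c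
    · rw [if_pos hmc, if_pos (by omega), hmc]
    · rw [if_neg hmc, if_neg (by omega)]
  | succ r ih =>
    intro hb1 hb2 m hm0 hm1
    have hb1' : 0 ≤ c - (r : Int) := by push_cast at hb1 ⊢; omega
    have hb2' : c + (r : Int) < (sw.length : Int) := by push_cast at hb2 ⊢; omega
    have hFr := ih hb1' hb2'
    rw [show (((r + 1 : Nat) : Int)) + 1 = ((r : Int) + 1) + 1 by push_cast; ring,
      PySem.List.pyRange_one_succ_right (by omega), List.foldl_append, List.foldl_cons,
      List.foldl_nil]
    set F := (PySem.List.pyRange 1 ((r : Int) + 1) 1).foldl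
      (fun sw j => flipAt (flipAt sw (c - j)) (c + j)) (flipAt sw c) with hF
    have hlF : (F.length : Int) = (sw.length : Int) := by
      rw [hF, length_foldFlip, length_flipAt]
    have hlF2 : ((flipAt F (c - ((r : Int) + 1))).length : Int) = (sw.length : Int) := by
      rw [length_flipAt, hlF]
    push_cast at hb1 hb2
    rw [pyGetD_flipAt _ _ _ (by omega) (by rw [hlF2]; omega) hm0 (by rw [hlF2]; omega),
      pyGetD_flipAt F _ _ (by omega) (by rw [hlF]; omega) (by omega) (by rw [hlF]; omega),
      pyGetD_flipAt F _ _ (by omega) (by rw [hlF]; omega) hm0 (by rw [hlF]; omega),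
      hFr (c + ((r : Int) + 1)) (by omega) (by omega),
      hFr (c - ((r : Int) + 1)) (by omega) (by omega),
      hFr m hm0 hm1]
    by_cases hmp : m = c + ((r : Int) + 1)
    · rw [if_pos hmp, if_neg (by omega), if_neg (by omega), if_pos (by omega), hmp]
    · rw [if_neg hmp]
      by_cases hmm : m = c - ((r : Int) + 1)
      · rw [if_pos hmm, if_neg (by omega), if_pos (by omega), hmm]
      · rw [if_neg hmm]
        by_cases hw : c - (r : Int) ≤ m ∧ m ≤ c + (r : Int)
        · rw [if_pos hw, if_pos (by omega)]
        · rw [if_neg hw, if_neg (by omega)]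

-- ===== VERDICT (by name: the statement is the Claim_ definition above) =====
theorem girl_spec : Claim_equal_girl := by
  unfold Claim_equal_girl
  intro n sw _
  unfold Spec_girl girl girl_alt
  by_cases hg : n - 1 < 0 ∨ (sw.length : Int) ≤ n - 1
  · rw [if_pos hg]
    cases h : sw.length with
    | zero => exact girlGo_zero (n - 1) sw 0
    | succ m =>
      rw [girlGo_succ, if_pos (by push_cast; omega)]
  · rw [if_neg hg]
    push Not at hg
    obtain ⟨h0, h1⟩ := hg
    cases h : sw.length with
    | zero => exfalso; rw [h] at h1; omega
    | succ m =>
      dsimp only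
      -- A's first iteration flips the center
      have hstep : girlGo (m + 1) (n - 1) sw 0 = girlGo m (n - 1) (flipAt sw (n - 1)) 1 := by
        rw [girlGo_succ, if_neg (by push_cast; omega), if_pos (by norm_num)]
        norm_num
      rw [hstep]
      have hagree : ∀ j : Nat, 0 < j → 0 ≤ (n - 1) - (j : Int) → (n - 1) + (j : Int) < (sw.length : Int) →
          PySem.List.pyGetD (flipAt sw (n - 1)) ((n - 1) - (j : Int)) 0 = PySem.List.pyGetD sw ((n - 1) - (j : Int)) 0 ∧
          PySem.List.pyGetD (flipAt sw (n - 1)) ((n - 1) + (j : Int)) 0 = PySem.List.pyGetD sw ((n - 1) + (j : Int)) 0 := by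
        intro j hj ha hb
        constructor
        · rw [pyGetD_flipAt _ _ _ h0 h1 (by omega) (by omega), if_neg (by omega)]
        · rw [pyGetD_flipAt _ _ _ h0 h1 (by omega) (by omega), if_neg (by omega)]
      have hmain := girlGo_eq_fold m (n - 1) sw 0 (flipAt sw (n - 1))
        (by rw [length_flipAt]) hagree
      push_cast at hmain
      rw [hmain]
      -- B's slices are take/drop
      have hsl1 : PySem.List.slice sw none (some (n - 1)) = sw.take (n - 1).toNat :=
        PySem.List.slice_to sw h0
      have hsl2 : PySem.List.slice sw (some (n - 1 + 1)) none = sw.drop ((n - 1).toNat + 1) := by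
        rw [PySem.List.slice_from sw (by omega : (0:Int) ≤ n - 1 + 1)]
        congr 1
        omega
      rw [hsl1, hsl2]
      set z := ((sw.take (n - 1).toNat).reverse.zip (sw.drop ((n - 1).toNat + 1))) with hz
      have hlz : z.length = min (n - 1).toNat (sw.length - ((n - 1).toNat + 1)) := by
        rw [hz, List.length_zip, List.length_reverse, List.length_take, List.length_drop]
        omega
      -- the stopping point of A's loop is B's first-mismatch radius
      have hrad : girlRad m (n - 1) sw 0 = firstMismatch z := by
        have := girlRad_eq_firstMismatch (n - 1) sw h0 h1 m 0 (by rw [← hz, hlz]; omega)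
        rw [← hz, List.drop_zero] at this
        omega
      rw [hrad]
      have hrle : firstMismatch z ≤ z.length := firstMismatch_le_length z
      have hb1 : 0 ≤ (n - 1) - (firstMismatch z : Int) := by omega
      have hb2 : (n - 1) + (firstMismatch z : Int) < (sw.length : Int) := by omega
      -- compare element by element
      apply List.ext_getElem
      · rw [length_foldFlip, length_flipAt, List.length_map, PySem.List.length_enumerate]
      · intro i hi1 hi2
        have hisw : i < sw.length := by
          rw [length_foldFlip, length_flipAt] at hi1
          exact hi1
        have hget := foldFlip_getD sw (n - 1) h0 h1 (firstMismatch z) hb1 hb2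
          (i : Int) (by omega) (by omega)
        have eL : ((PySem.List.pyRange 1 ((firstMismatch z : Int) + 1) 1).foldl
            (fun sw j => flipAt (flipAt sw ((n - 1) - j)) ((n - 1) + j)) (flipAt sw (n - 1)))[i]'hi1 =
            PySem.List.pyGetD ((PySem.List.pyRange 1 ((firstMismatch z : Int) + 1) 1).foldl
              (fun sw j => flipAt (flipAt sw ((n - 1) - j)) ((n - 1) + j)) (flipAt sw (n - 1))) (i : Int) 0 := by
          rw [PySem.List.pyGetD_eq_getElem _ 0 (by omega)
            (by rw [length_foldFlip, length_flipAt]; omega)]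
          congr 1
        have eS : PySem.List.pyGetD sw (i : Int) 0 = sw[i]'hisw := by
          rw [PySem.List.pyGetD_eq_getElem sw 0 (by omega) (by omega)]
          congr 1
        rw [eL, hget, eS, List.getElem_map, PySem.List.getElem_enumerate]
        have hiff : |(0 + (i : Int)) - (n - 1)| ≤ (firstMismatch z : Int) ↔
            ((n - 1) - (firstMismatch z : Int) ≤ (i : Int) ∧ (i : Int) ≤ (n - 1) + (firstMismatch z : Int)) := by
          rw [abs_le]
          omega
        simp only [hiff]
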